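-- pv_equiv track=rewrite | github.com/miki4920/discord-roller | ReferenceOperations/MonsterReference.py | get_action_block
-- ===== SOURCE A (Python) =====
-- def get_action_block(name, actions):
--     action_block = ""
--     action_block_two = ""
--     too_large = False
--     for action in actions:
--         if len(action_block + f"**{action['name']}**\n{action['desc']}\n\n") > 2000:
--             too_large = True
--         if not too_large:
--             action_block += f"**{action['name']}**\n{action['desc']}\n\n"
--         else:
--             action_block_two += f"**{action['name']}**\n{action['desc']}\n\n"
--     messages = [(name, action_block)]
--     if too_large:
--         messages.append(("", action_block_two))
--     return messages
-- ===== SOURCE B (Python) =====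
-- def get_action_block(name, actions):
--     parts = [f"**{action['name']}**\n{action['desc']}\n\n" for action in actions]
--     split = len(parts)
--     total = 0
--     for i, part in enumerate(parts):
--         if total + len(part) > 2000:
--             split = i
--             break
--         total += len(part)
--     messages = [(name, "".join(parts[:split]))]
--     if split < len(parts):
--         messages.append(("", "".join(parts[split:])))
--     return messages
-- ===== Notes on version B (the rewrite author's own statement) =====
-- stated objective: simpler
-- what changed: Replaces A's interleaved sticky-flag loop with repeated string concatenation by a precompute-the-parts / find-the-split-index / slice-and-join decomposition.
import Mathlib
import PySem

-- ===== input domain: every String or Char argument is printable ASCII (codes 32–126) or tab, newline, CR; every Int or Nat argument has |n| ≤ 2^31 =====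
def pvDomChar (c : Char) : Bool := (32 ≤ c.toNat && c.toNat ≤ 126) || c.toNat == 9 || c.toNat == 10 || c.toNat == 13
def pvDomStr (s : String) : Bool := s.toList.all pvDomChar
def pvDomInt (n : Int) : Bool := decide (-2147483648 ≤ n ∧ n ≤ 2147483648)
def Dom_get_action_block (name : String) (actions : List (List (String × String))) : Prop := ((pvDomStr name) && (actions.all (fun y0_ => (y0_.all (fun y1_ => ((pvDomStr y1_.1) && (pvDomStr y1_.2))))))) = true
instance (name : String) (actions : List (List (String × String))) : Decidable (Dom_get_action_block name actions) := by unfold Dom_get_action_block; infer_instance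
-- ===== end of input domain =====

-- B replaces A's interleaved sticky-flag loop by precompute-parts / find-split-index / slice-and-join (simpler decomposition).

-- ===== PORT A =====
-- the f-string f"**{action['name']}**\n{action['desc']}\n\n" (total under Pre_: both keys present)
def pvPart (action : List (String × String)) : String :=
  "**" ++ (PySem.Dict.mk action).getD "name" "" ++ "**\n" ++ (PySem.Dict.mk action).getD "desc" "" ++ "\n\n"

def pvStepA (st : String × String × Bool) (action : List (String × String)) : String × String × Bool :=
  let p := pvPart action
  let tl := if PySem.Str.len (st.1 ++ p) > 2000 then true else st.2.2
  if !tl then (st.1 ++ p, st.2.1, tl) else (st.1, st.2.1 ++ p, tl)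

def get_action_block (name : String) (actions : List (List (String × String))) : List (String × String) :=
  let st := actions.foldl pvStepA ("", "", false)
  let messages := [(name, st.1)]
  if st.2.2 then messages ++ [("", st.2.1)] else messages

-- ===== PORT B =====
-- running-length scan for the first index whose part no longer fits (default: length of the list)
def pvFindSplit (i : Nat) (total : Int) : List String → Nat
  | [] => i
  | p :: rest =>
      if total + PySem.Str.len p > 2000 then i
      else pvFindSplit (i + 1) (total + PySem.Str.len p) rest

def get_action_block_alt (name : String) (actions : List (List (String × String))) : List (String × String) :=
  let parts := actions.map pvPart
  let split := pvFindSplit 0 0 parts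
  let messages := [(name, PySem.Str.join "" (parts.take split))]
  if split < parts.length then messages ++ [("", PySem.Str.join "" (parts.drop split))] else messages

-- ===== PRECONDITION & SPEC =====
-- Pre_ excludes exactly the actions missing a 'name' or 'desc' key, on which A's f-string raises KeyError.
def Pre_get_action_block (name : String) (actions : List (List (String × String))) : Prop :=
  ∀ a ∈ actions, (PySem.Dict.mk a).contains "name" = true ∧ (PySem.Dict.mk a).contains "desc" = true
instance (name : String) (actions : List (List (String × String))) : Decidable (Pre_get_action_block name actions) := by unfold Pre_get_action_block; infer_instance

def pvWitness_get_action_block : String × (List (List (String × String))) :=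
  ("Goblin", [[("name", "Bite"), ("desc", "Melee attack.")], [("name", "Nimble"), ("desc", "Dash as bonus action.")]])

def Spec_get_action_block (name : String) (actions : List (List (String × String))) (out : List (String × String)) : Prop := out = get_action_block_alt name actions
instance (name : String) (actions : List (List (String × String))) (out : List (String × String)) : Decidable (Spec_get_action_block name actions out) := by unfold Spec_get_action_block; infer_instance

-- ===== CLAIM (what is proved, stated in full; the proofs are below) =====
def Claim_equal_get_action_block : Prop := ∀ (name : String) (actions : List (List (String × String))), Dom_get_action_block name actions → Pre_get_action_block name actions → Spec_get_action_block name actions (get_action_block name actions)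

-- ===== LEMMAS AND PROOFS =====

theorem pvJoin_nil_str : PySem.Str.join "" ([] : List String) = "" := rfl

theorem pvChJoin_cons (x : List Char) (xs : List (List Char)) :
    PySem.Chars.join [] (x :: xs) = x ++ PySem.Chars.join [] xs := by
  cases xs <;> simp [PySem.Chars.join, List.intercalate, List.intersperse]

theorem pvJoin_cons_str (p : String) (ps : List String) :
    PySem.Str.join "" (p :: ps) = p ++ PySem.Str.join "" ps := by
  apply String.toList_injective
  simp [pvChJoin_cons p.toList (ps.map String.toList)]

theorem pvFindSplit_shift (ps : List String) (i : Nat) (t : Int) :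
    pvFindSplit i t ps = i + pvFindSplit 0 t ps := by
  induction ps generalizing i t with
  | nil => simp [pvFindSplit]
  | cons p rest ih =>
      simp only [pvFindSplit]
      split_ifs with h
      · simp
      · rw [ih (i + 1), ih 1]; omega

theorem pvFoldA_true (ps : List (List (String × String))) (b1 b2 : String) :
    ps.foldl pvStepA (b1, b2, true) = (b1, b2 ++ PySem.Str.join "" (ps.map pvPart), true) := by
  induction ps generalizing b2 with
  | nil => simp [pvJoin_nil_str]
  | cons a rest ih =>
      simp only [List.foldl_cons, pvStepA, ite_self, Bool.not_true, if_neg (by simp : ¬ (false = true))]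
      rw [ih]
      simp [pvJoin_cons_str, String.append_assoc]

theorem pvFoldA_false (ps : List (List (String × String))) (b1 b2 : String) :
    ps.foldl pvStepA (b1, b2, false) =
      (let k := pvFindSplit 0 (PySem.Str.len b1) (ps.map pvPart)
       if k < ps.length then
         (b1 ++ PySem.Str.join "" ((ps.map pvPart).take k),
          b2 ++ PySem.Str.join "" ((ps.map pvPart).drop k), true)
       else (b1 ++ PySem.Str.join "" (ps.map pvPart), b2, false)) := by
  induction ps generalizing b1 with
  | nil => simp [pvFindSplit, pvJoin_nil_str]
  | cons a rest ih =>
      by_cases h : PySem.Str.len (b1 ++ pvPart a) > 2000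
      · have hcond : PySem.Str.len b1 + PySem.Str.len (pvPart a) > 2000 := by
          rwa [PySem.Str.len_append] at h
        simp only [List.foldl_cons, pvStepA, if_pos h]
        simp only [Bool.not_true, if_neg (by simp : ¬ (false = true))]
        rw [pvFoldA_true]
        simp only [List.map_cons, pvFindSplit, if_pos hcond]
        simp [pvJoin_nil_str, pvJoin_cons_str, String.append_assoc]
      · have hcond : ¬ (PySem.Str.len b1 + PySem.Str.len (pvPart a) > 2000) := by
          rwa [PySem.Str.len_append] at h
        simp only [List.foldl_cons, pvStepA, if_neg h]
        simp only [Bool.not_false, if_true]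
        rw [ih (b1 ++ pvPart a)]
        simp only [List.map_cons, pvFindSplit, if_neg hcond]
        rw [pvFindSplit_shift (List.map pvPart rest) (0 + 1), PySem.Str.len_append]
        simp only [Nat.zero_add]
        set k := pvFindSplit 0 (PySem.Str.len b1 + PySem.Str.len (pvPart a)) (rest.map pvPart) with hk
        simp only [List.length_cons]
        have hlt : k < rest.length ↔ 1 + k < rest.length + 1 := by omega
        by_cases hkl : k < rest.length
        · rw [if_pos hkl, if_pos (by omega)]
          simp [List.take_succ_cons, List.drop_succ_cons, pvJoin_cons_str, String.append_assoc,
                show 1 + k = k + 1 from by omega]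
        · rw [if_neg hkl, if_neg (by omega)]
          simp [pvJoin_cons_str, String.append_assoc]

-- ===== VERDICT (by name: the statement is the Claim_ definition above) =====
theorem get_action_block_spec : Claim_equal_get_action_block := by
  intro name actions _ _
  unfold Spec_get_action_block get_action_block get_action_block_alt
  rw [pvFoldA_false]
  have h0 : PySem.Str.len ("" : String) = 0 := rfl
  simp only [h0]
  by_cases hkl : pvFindSplit 0 0 (List.map pvPart actions) < actions.length
  · rw [if_pos hkl]
    simp [hkl]
  · rw [if_neg hkl]
    have hle : (List.map pvPart actions).length ≤ pvFindSplit 0 0 (List.map pvPart actions) := by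
      rw [List.length_map]; exact Nat.le_of_not_lt hkl
    simp [hkl, List.take_of_length_le hle]
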